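-- pv_equiv track=rewrite | github.com/code-study-classes/python-basics-SashaRudskiy | practice_package/loops.py | count_vowel_triplets
-- ===== SOURCE A (Python) =====
-- def count_vowel_triplets(text):
--     vowels = set("aeiouy")
--     text_lower = text.lower()
--     count = 0
--     i = 0
--     while i <= len(text_lower) - 3:
--         window = text_lower[i:i+3]
--         if all(c in vowels for c in window):
--             count += 1
--             i += 3  # skip to next non-overlapping window
--         else:
--             i += 1
--     return count
-- ===== SOURCE B (Python) =====
-- from itertools import groupby
--
-- def count_vowel_triplets(text):
--     vowels = set("aeiouy")
--     total = 0
--     for is_vowel, group in groupby(text.lower(), key=lambda c: c in vowels):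
--         if is_vowel:
--             total += len(list(group)) // 3
--     return total
-- ===== Notes on version B (the rewrite author's own statement) =====
-- stated objective: idiomatic
-- what changed: Replaced the variable-stride sliding-window while-loop with itertools.groupby run detection: each maximal vowel run contributes floor(len/3) triplets, summed in one pass.
import Mathlib
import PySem

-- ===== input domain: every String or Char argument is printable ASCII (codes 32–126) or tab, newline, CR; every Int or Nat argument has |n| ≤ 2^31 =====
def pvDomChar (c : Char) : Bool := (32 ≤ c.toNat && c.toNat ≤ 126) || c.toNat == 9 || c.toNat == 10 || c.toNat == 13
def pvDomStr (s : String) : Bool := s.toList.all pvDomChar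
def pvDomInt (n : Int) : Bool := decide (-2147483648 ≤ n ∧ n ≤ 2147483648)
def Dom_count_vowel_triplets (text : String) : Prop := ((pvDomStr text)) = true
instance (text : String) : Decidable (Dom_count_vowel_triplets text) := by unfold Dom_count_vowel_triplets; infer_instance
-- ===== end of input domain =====

-- B replaces A's variable-stride sliding window with groupby-style run detection
-- (each maximal vowel run contributes ⌊len/3⌋); more idiomatic, same cost.


-- ===== PORT A =====
-- vowels = set("aeiouy")
def pvVowels : PySem.Set Char := PySem.Set.ofList "aeiouy".toList

-- the while loop: i, count as in A; condition 'i <= len(text_lower) - 3' over Int,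
-- window = text_lower[i:i+3] as a Python slice
def pvLoopA (s : List Char) (i : Int) (count : Int) : Int :=
  if h : i ≤ (s.length : Int) - 3 then
    let window := PySem.List.slice s (some i) (some (i + 3))
    if window.all (fun c => PySem.Set.contains pvVowels c) then
      pvLoopA s (i + 3) (count + 1)
    else
      pvLoopA s (i + 1) count
  else count
termination_by ((s.length : Int) - i).toNat
decreasing_by all_goals omega

def count_vowel_triplets (text : String) : Int :=
  pvLoopA (PySem.Str.lower text).toList 0 0

-- ===== PORT B =====
def pvIsVowel (c : Char) : Bool := PySem.Set.contains pvVowels c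

-- itertools.groupby over the lowered text: a vowel head starts a maximal vowel run,
-- which contributes len(run) // 3 (run length is a nonnegative Nat, so Nat '/' is Python '//')
def pvGroupB : List Char → Int
  | [] => 0
  | c :: t =>
    if pvIsVowel c then
      (((c :: t).takeWhile pvIsVowel).length / 3 : Nat) + pvGroupB (t.dropWhile pvIsVowel)
    else pvGroupB t
termination_by l => l.length
decreasing_by
  · exact Nat.lt_succ_of_le (List.length_dropWhile_le _ _)
  · exact Nat.lt_succ_self _

def count_vowel_triplets_alt (text : String) : Int :=
  pvGroupB (PySem.Str.lower text).toList

-- ===== PRECONDITION & SPEC =====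
def Spec_count_vowel_triplets (text : String) (out : Int) : Prop := out = count_vowel_triplets_alt text
instance (text : String) (out : Int) : Decidable (Spec_count_vowel_triplets text out) := by unfold Spec_count_vowel_triplets; infer_instance

-- ===== CLAIM (what is proved, stated in full; the proofs are below) =====
def Claim_equal_count_vowel_triplets : Prop := ∀ (text : String), Dom_count_vowel_triplets text → Spec_count_vowel_triplets text (count_vowel_triplets text)

-- ===== LEMMAS AND PROOFS =====

-- list-level restatement of A's loop (a window of three explicit heads)
def pvGA : List Char → Int
  | a :: b :: c :: t =>
    if pvIsVowel a && pvIsVowel b && pvIsVowel c then 1 + pvGA t else pvGA (b :: c :: t)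
  | _ => 0
termination_by l => l.length
decreasing_by
  · simp; omega
  · simp

-- state machine: j ∈ {0,1,2} = vowels accumulated since the last consumed triple
def pvM : List Char → Nat → Int
  | [], _ => 0
  | c :: t, j =>
    if pvIsVowel c then (if j = 2 then 1 + pvM t 0 else pvM t (j + 1)) else pvM t 0

theorem pvLoopA_eq_gA (s : List Char) (i : Nat) (count : Int) :
    pvLoopA s (i : Int) count = count + pvGA (s.drop i) := by
  induction hn : s.length - i using Nat.strong_induction_on generalizing i count with
  | _ n ih =>
  rw [pvLoopA]
  by_cases h : (i : Int) ≤ (s.length : Int) - 3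
  · have h3 : i + 3 ≤ s.length := by omega
    rw [dif_pos h]
    have hw : PySem.List.slice s (some (i : Int)) (some ((i : Int) + 3)) = (s.drop i).take 3 := by
      have := PySem.List.slice_natCast_add (xs := s) (j := i) (n := 3)
      simpa using this
    have hlen : 3 ≤ (s.drop i).length := by rw [List.length_drop]; omega
    rcases hd : s.drop i with _ | ⟨a, _ | ⟨b, _ | ⟨c, t⟩⟩⟩
    · rw [hd] at hlen; simp at hlen
    · rw [hd] at hlen; simp at hlen
    · rw [hd] at hlen; simp at hlen
    have hd1 : s.drop (i + 1) = b :: c :: t := by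
      have : s.drop (i + 1) = (s.drop i).drop 1 := by rw [List.drop_drop]
      rw [this, hd]; rfl
    have hd3 : s.drop (i + 3) = t := by
      have : s.drop (i + 3) = (s.drop i).drop 3 := by rw [List.drop_drop]
      rw [this, hd]; rfl
    rw [hw, hd, show (a :: b :: c :: t).take 3 = [a, b, c] from rfl]
    by_cases hv : pvIsVowel a && pvIsVowel b && pvIsVowel c
    · have hv' : [a, b, c].all (fun c => PySem.Set.contains pvVowels c) = true := by
        simp only [List.all_cons, List.all_nil, pvIsVowel] at hv ⊢; simp_all
      rw [if_pos hv']
      have hc : ((i : Int) + 3) = ((i + 3 : Nat) : Int) := by push_cast; ring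
      rw [hc, ih (s.length - (i + 3)) (by omega) (i + 3) (count + 1) rfl, hd3]
      rw [pvGA, if_pos hv]; ring
    · have hv' : ¬ ([a, b, c].all (fun c => PySem.Set.contains pvVowels c) = true) := by
        simp only [List.all_cons, List.all_nil, pvIsVowel] at hv ⊢; simp_all
      rw [if_neg hv']
      have hc : ((i : Int) + 1) = ((i + 1 : Nat) : Int) := by push_cast; ring
      rw [hc, ih (s.length - (i + 1)) (by omega) (i + 1) count rfl, hd1]
      rw [pvGA, if_neg hv]
  · rw [dif_neg h]
    have hlen : (s.drop i).length < 3 := by rw [List.length_drop]; omega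
    rcases hds : s.drop i with _ | ⟨a, _ | ⟨b, _ | ⟨c, t⟩⟩⟩
    · simp [pvGA]
    · simp [pvGA]
    · simp [pvGA]
    · exfalso; rw [hds] at hlen; simp [List.length_cons] at hlen; omega

-- pvM with accumulator j ≤ 2 over a list whose maximal vowel prefix has length r
-- contributes (j + r) / 3 and then restarts at the first non-vowel
theorem pvM_run (l : List Char) (j : Nat) (hj : j ≤ 2) :
    pvM l j = (((j + (l.takeWhile pvIsVowel).length) / 3 : Nat) : Int)
        + pvM (l.dropWhile pvIsVowel) 0 := by
  induction l generalizing j with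
  | nil => simp [pvM]; omega
  | cons c t ih =>
    by_cases hv : pvIsVowel c
    · rw [List.takeWhile_cons_of_pos hv, List.dropWhile_cons_of_pos hv]
      by_cases h2 : j = 2
      · subst h2
        rw [show pvM (c :: t) 2 = 1 + pvM t 0 by simp [pvM, hv]]
        rw [ih 0 (by omega)]
        simp only [List.length_cons]
        rw [show (2 + ((t.takeWhile pvIsVowel).length + 1)) / 3
            = 1 + (0 + (t.takeWhile pvIsVowel).length) / 3 from by omega]
        push_cast; ring
      · rw [show pvM (c :: t) j = pvM t (j + 1) by simp [pvM, hv, h2]]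
        rw [ih (j + 1) (by omega)]
        simp only [List.length_cons]
        rw [show (j + ((t.takeWhile pvIsVowel).length + 1))
            = (j + 1 + (t.takeWhile pvIsVowel).length) from by omega]
    · rw [List.takeWhile_cons_of_neg hv, List.dropWhile_cons_of_neg hv]
      rw [show pvM (c :: t) j = pvM t 0 by simp [pvM, hv]]
      rw [show pvM (c :: t) 0 = pvM t 0 by simp [pvM, hv]]
      rw [show (j + ([] : List Char).length) / 3 = 0 from by simp; omega]
      simp

theorem pvGroupB_eq_pvM (l : List Char) : pvGroupB l = pvM l 0 := by
  induction hn : l.length using Nat.strong_induction_on generalizing l with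
  | _ n ih =>
  match l with
  | [] => simp [pvGroupB, pvM]
  | c :: t =>
    by_cases hv : pvIsVowel c
    · rw [pvGroupB, if_pos hv]
      rw [pvM_run (c :: t) 0 (by omega)]
      rw [List.takeWhile_cons_of_pos hv, List.dropWhile_cons_of_pos hv]
      have hle : (t.dropWhile pvIsVowel).length ≤ t.length := List.length_dropWhile_le _ _
      rw [ih (t.dropWhile pvIsVowel).length (by simp at hn; omega) _ rfl]
      simp [List.length_cons]
    · rw [pvGroupB, if_neg hv]
      rw [show pvM (c :: t) 0 = pvM t 0 by simp [pvM, hv]]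
      exact ih t.length (by simp at hn; omega) t rfl

theorem pvGA_eq_pvM (l : List Char) : pvGA l = pvM l 0 := by
  induction hn : l.length using Nat.strong_induction_on generalizing l with
  | _ n ih =>
  rcases l with _ | ⟨a, _ | ⟨b, _ | ⟨c, t⟩⟩⟩
  · simp [pvGA, pvM]
  · rw [show pvGA [a] = 0 from by simp [pvGA]]
    by_cases h : pvIsVowel a <;> simp [pvM, h]
  · rw [show pvGA [a, b] = 0 from by simp [pvGA]]
    by_cases ha : pvIsVowel a <;> by_cases hb : pvIsVowel b <;> simp [pvM, ha, hb]
  · rw [pvGA]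
    by_cases ha : pvIsVowel a
    · by_cases hb : pvIsVowel b
      · by_cases hc : pvIsVowel c
        · rw [if_pos (by simp [ha, hb, hc])]
          rw [ih t.length (by simp at hn; omega) t rfl]
          simp [pvM, ha, hb, hc]
        · rw [if_neg (by simp [ha, hb, hc])]
          rw [ih (b :: c :: t).length (by simp at hn ⊢; omega) _ rfl]
          simp [pvM, ha, hb, hc]
      · rw [if_neg (by simp [ha, hb])]
        rw [ih (b :: c :: t).length (by simp at hn ⊢; omega) _ rfl]
        simp [pvM, ha, hb]
    · rw [if_neg (by simp [ha])]
      rw [ih (b :: c :: t).length (by simp at hn ⊢; omega) _ rfl]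
      simp [pvM, ha]

-- ===== VERDICT (by name: the statement is the Claim_ definition above) =====
theorem count_vowel_triplets_spec : Claim_equal_count_vowel_triplets := by
  intro text _
  unfold Spec_count_vowel_triplets count_vowel_triplets count_vowel_triplets_alt
  have h0 : ((0 : Nat) : Int) = (0 : Int) := rfl
  rw [← h0, pvLoopA_eq_gA, List.drop_zero, pvGA_eq_pvM, pvGroupB_eq_pvM]
  omega
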